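-- pv_equiv track=rewrite | github.com/takatodo/gpu-toggle-coverage-campaigns | src/tools/slice_vl_gpu_ptx_callseq_prefix.py | _find_function_bounds
-- ===== SOURCE A (Python) =====
-- def _find_function_bounds(lines: list[str], entry_idx: int) -> tuple[int, int]:
--     open_idx = None
--     depth = 0
--     for idx in range(entry_idx, len(lines)):
--         stripped = lines[idx].strip()
--         if open_idx is None:
--             if stripped == "{":
--                 open_idx = idx
--                 depth = 1
--             continue
--         depth += lines[idx].count("{")
--         depth -= lines[idx].count("}")
--         if depth == 0:
--             return open_idx, idx
--     raise ValueError("unterminated PTX entry function")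
-- ===== SOURCE B (Python) =====
-- def _find_function_bounds(lines: list[str], entry_idx: int) -> tuple[int, int]:
--     window = range(entry_idx, len(lines))
--     # Running brace balance after each line of the window, computed once up front.
--     bal, b = [], 0
--     for i in window:
--         b += lines[i].count("{") - lines[i].count("}")
--         bal.append(b)
--     for k, i in enumerate(window):
--         if lines[i].strip() == "{":
--             # The body ends at the first later line whose running balance is one
--             # below the balance at the opening line (the depth counter cancels out).
--             try:
--                 j = bal.index(bal[k] - 1, k + 1)
--             except ValueError:
--                 raise ValueError("unterminated PTX entry function")
--             return i, entry_idx + j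
--     raise ValueError("unterminated PTX entry function")
-- ===== Notes on version B (the rewrite author's own statement) =====
-- stated objective: alternative
-- what changed: Replaces A's depth state machine with a precomputed running brace-balance table over the window: after locating the opening line, the closing line is found by a value lookup (list.index of bal[k]-1) in the balance table instead of counting depth while scanning.
import Mathlib
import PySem

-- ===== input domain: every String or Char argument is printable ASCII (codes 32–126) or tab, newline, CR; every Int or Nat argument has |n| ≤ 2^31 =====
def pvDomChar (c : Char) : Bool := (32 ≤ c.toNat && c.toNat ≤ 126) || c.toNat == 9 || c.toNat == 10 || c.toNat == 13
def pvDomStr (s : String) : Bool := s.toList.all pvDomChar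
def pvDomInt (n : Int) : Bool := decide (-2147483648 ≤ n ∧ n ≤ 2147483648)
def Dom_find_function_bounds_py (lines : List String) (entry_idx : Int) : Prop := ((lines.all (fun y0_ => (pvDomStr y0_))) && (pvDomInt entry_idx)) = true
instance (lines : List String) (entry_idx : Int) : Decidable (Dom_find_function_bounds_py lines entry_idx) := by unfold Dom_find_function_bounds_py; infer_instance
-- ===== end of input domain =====

-- B replaces A's depth state machine by a precomputed running brace-balance table:
-- the closing line is found by a value lookup (index of bal[k]-1) in that table.

-- ===== PORT A =====
-- A's single loop: state = (open_idx : Option Int, depth). (0,0) stands for the raise paths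
-- (ValueError / IndexError), which Pre_ excludes.
def pvALoop (lines : List String) : List Int → Option Int → Int → Int × Int
  | [], _, _ => (0, 0)
  | idx :: rest, o?, depth =>
    match PySem.List.pyGet? lines idx with
    | none => (0, 0)
    | some line =>
      match o? with
      | none =>
        if PySem.Str.strip line = "{" then pvALoop lines rest (some idx) 1
        else pvALoop lines rest none depth
      | some o =>
        let d := depth + (PySem.Str.count line "{" : Int) - (PySem.Str.count line "}" : Int)
        if d = 0 then (o, idx) else pvALoop lines rest (some o) d

def find_function_bounds_py (lines : List String) (entry_idx : Int) : Int × Int :=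
  pvALoop lines (PySem.List.pyRange entry_idx lines.length 1) none 0

-- ===== PORT B =====
-- bal.index(v, s): first position ≥ s holding v (Python list.index with a start).
def pvIndexFrom (xs : List Int) (v : Int) (s : Nat) : Option Nat :=
  (PySem.List.index? (xs.drop s) v).map (s + ·)

-- the running-balance list of the window; none = IndexError on some lines[i]
def pvBal (lines : List String) : List Int → Int → Option (List Int)
  | [], _ => some []
  | i :: rest, b =>
    match PySem.List.pyGet? lines i with
    | none => none
    | some line =>
      let b' := b + ((PySem.Str.count line "{" : Int) - (PySem.Str.count line "}" : Int))
      (pvBal lines rest b').map (b' :: ·)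

-- scan enumerate(window) for the opening line; on a hit, look the target balance up
def pvBScan (lines : List String) (e : Int) (bal : List Int) : List (Int × Int) → Int × Int
  | [] => (0, 0)
  | (k, i) :: rest =>
    match PySem.List.pyGet? lines i with
    | none => (0, 0)
    | some line =>
      if PySem.Str.strip line = "{" then
        match pvIndexFrom bal (PySem.List.pyGetD bal k 0 - 1) (k + 1).toNat with
        | none => (0, 0)
        | some j => (i, e + (j : Int))
      else pvBScan lines e bal rest

def find_function_bounds_py_alt (lines : List String) (entry_idx : Int) : Int × Int :=
  match pvBal lines (PySem.List.pyRange entry_idx lines.length 1) 0 with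
  | none => (0, 0)
  | some bal => pvBScan lines entry_idx bal
      (PySem.List.enumerate (PySem.List.pyRange entry_idx lines.length 1) 0)

-- ===== PRECONDITION & SPEC =====
-- Pre_: exactly the inputs where A returns (raises neither IndexError — entry_idx < -len —
-- nor ValueError): there is a first '{' line at or after entry_idx and the brace depth
-- started there returns to zero on some later line.
def Pre_find_function_bounds_py (lines : List String) (entry_idx : Int) : Prop :=
  -(lines.length : Int) ≤ entry_idx ∧
  ∃ i ∈ PySem.List.pyRange entry_idx lines.length 1,
    PySem.Str.strip (PySem.List.pyGetD lines i "") = "{" ∧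
    (∀ k ∈ PySem.List.pyRange entry_idx i 1, PySem.Str.strip (PySem.List.pyGetD lines k "") ≠ "{") ∧
    ∃ j ∈ PySem.List.pyRange (i + 1) lines.length 1,
      1 + ((PySem.List.pyRange (i + 1) (j + 1) 1).map (fun k =>
        (PySem.Str.count (PySem.List.pyGetD lines k "") "{" : Int) -
        (PySem.Str.count (PySem.List.pyGetD lines k "") "}" : Int))).sum = 0
instance (lines : List String) (entry_idx : Int) : Decidable (Pre_find_function_bounds_py lines entry_idx) := by unfold Pre_find_function_bounds_py; infer_instance

def pvWitness_find_function_bounds_py : List String × Int := (["  {", "  ret;", "}"], 0)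

def Spec_find_function_bounds_py (lines : List String) (entry_idx : Int) (out : Int × Int) : Prop := out = find_function_bounds_py_alt lines entry_idx
instance (lines : List String) (entry_idx : Int) (out : Int × Int) : Decidable (Spec_find_function_bounds_py lines entry_idx out) := by unfold Spec_find_function_bounds_py; infer_instance

-- ===== CLAIM =====
def Claim_equal_find_function_bounds_py : Prop := ∀ (lines : List String) (entry_idx : Int), Dom_find_function_bounds_py lines entry_idx → Pre_find_function_bounds_py lines entry_idx → Spec_find_function_bounds_py lines entry_idx (find_function_bounds_py lines entry_idx)

-- ===== LEMMAS AND PROOFS =====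

-- per-line brace delta (total form, valid under in-range indices)
def pvDelta (lines : List String) (i : Int) : Int :=
  (PySem.Str.count (PySem.List.pyGetD lines i "") "{" : Int) -
  (PySem.Str.count (PySem.List.pyGetD lines i "") "}" : Int)

-- proof-side running balances
def pvBals (lines : List String) : List Int → Int → List Int
  | [], _ => []
  | i :: rest, b => (b + pvDelta lines i) :: pvBals lines rest (b + pvDelta lines i)

lemma pvBals_length (lines : List String) : ∀ (L : List Int) (b : Int),
    (pvBals lines L b).length = L.length := by
  intro L
  induction L with
  | nil => intro b; rfl
  | cons i rest ih => intro b; simp [pvBals, ih]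

lemma pvGet_eq (lines : List String) (i : Int)
    (h1 : -(lines.length : Int) ≤ i) (h2 : i < lines.length) :
    PySem.List.pyGet? lines i = some (PySem.List.pyGetD lines i "") := by
  simp only [PySem.List.pyGet?, PySem.List.pyGetD, PySem.List.pyIdx?]
  split_ifs with h3
  · simp only [Option.bind_some]
    rw [List.getElem?_eq_getElem (by omega)]; simp
  · simp only [Option.bind_some]
    rw [List.getElem?_eq_getElem (by omega)]; simp

lemma pvBal_eq (lines : List String) : ∀ (L : List Int) (b : Int),
    (∀ i ∈ L, PySem.List.pyGet? lines i = some (PySem.List.pyGetD lines i "")) →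
    pvBal lines L b = some (pvBals lines L b) := by
  intro L
  induction L with
  | nil => intro b h; rfl
  | cons i rest ih =>
    intro b h
    have hi := h i (by simp)
    simp only [pvBal, pvBals, hi]
    rw [ih _ (fun j hj => h j (by simp [hj]))]
    simp [pvDelta]

lemma pvClose_core (lines : List String) : ∀ (L : List Int) (b d o : Int),
    (∀ i ∈ L, PySem.List.pyGet? lines i = some (PySem.List.pyGetD lines i "")) →
    pvALoop lines L (some o) d =
      (match PySem.List.index? (pvBals lines L b) (b - d) with
       | none => (0, 0)
       | some j => (o, PySem.List.pyGetD L (j : Int) 0)) := by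
  intro L
  induction L with
  | nil => intro b d o h; rfl
  | cons i rest ih =>
    intro b d o h
    have hi := h i (by simp)
    simp only [pvALoop, hi, pvBals]
    have hd : d + (PySem.Str.count (PySem.List.pyGetD lines i "") "{" : Int) -
        (PySem.Str.count (PySem.List.pyGetD lines i "") "}" : Int) = d + pvDelta lines i := by
      simp [pvDelta]; ring
    rw [hd]
    by_cases h0 : d + pvDelta lines i = 0
    · rw [if_pos h0]
      have hb : b + pvDelta lines i = b - d := by omega
      rw [hb, PySem.List.index?_cons_self]
      simp [PySem.List.pyGetD_zero_cons]
    · rw [if_neg h0]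
      rw [ih (b + pvDelta lines i) (d + pvDelta lines i) o (fun j hj => h j (by simp [hj]))]
      have hne : b + pvDelta lines i ≠ b - d := by omega
      rw [PySem.List.index?_cons_of_ne _ hne]
      have harg : b + pvDelta lines i - (d + pvDelta lines i) = b - d := by ring
      rw [harg]
      cases hidx : PySem.List.index? (pvBals lines rest (b + pvDelta lines i)) (b - d) with
      | none => rfl
      | some j =>
        simp only [Option.map_some]
        rw [PySem.List.pyGetD_natCast, PySem.List.pyGetD_natCast, List.getD_cons_succ]

lemma pvScan_eq (lines : List String) (e : Int) (bal : List Int) :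
    ∀ (m : Nat) (c : Int) (k : Nat) (bk : Int),
      c = e + k →
      ((lines.length : Int) - c).toNat ≤ m →
      (∀ i ∈ PySem.List.pyRange c lines.length 1,
        PySem.List.pyGet? lines i = some (PySem.List.pyGetD lines i "")) →
      bal.drop k = pvBals lines (PySem.List.pyRange c lines.length 1) bk →
      pvALoop lines (PySem.List.pyRange c lines.length 1) none 0 =
        pvBScan lines e bal (PySem.List.enumerate (PySem.List.pyRange c lines.length 1) k) := by
  intro m
  induction m with
  | zero =>
    intro c k bk hc hm h hdrop
    have hnil : PySem.List.pyRange c (lines.length : Int) 1 = [] :=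
      PySem.List.pyRange_one_eq_nil (by omega)
    rw [hnil]; rfl
  | succ m ih =>
    intro c k bk hc hm h hdrop
    by_cases hlt : c < (lines.length : Int)
    · rw [PySem.List.pyRange_one_cons hlt] at hdrop h ⊢
      simp only [pvBals] at hdrop
      have hcv := h c (by simp)
      have hdrop1 : bal.drop (k + 1) =
          pvBals lines (PySem.List.pyRange (c + 1) lines.length 1) (bk + pvDelta lines c) := by
        rw [← List.tail_drop, hdrop]
        rfl
      rw [PySem.List.enumerate_cons]
      simp only [pvALoop, pvBScan, hcv]
      by_cases hs : PySem.Str.strip (PySem.List.pyGetD lines c "") = "{"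
      · rw [if_pos hs, if_pos hs]
        have hget : PySem.List.pyGetD bal (k : Int) 0 = bk + pvDelta lines c := by
          rw [PySem.List.pyGetD_natCast]
          have hk0 : bal[k]? = some (bk + pvDelta lines c) := by
            have h0 : (bal.drop k)[0]? = some (bk + pvDelta lines c) := by rw [hdrop]; rfl
            rw [List.getElem?_drop] at h0
            simpa using h0
          simp [List.getD, hk0]
        rw [hget]
        have htn : (((k : Int)) + 1).toNat = k + 1 := by omega
        rw [htn]
        unfold pvIndexFrom
        rw [hdrop1]
        rw [pvClose_core lines _ (bk + pvDelta lines c) 1 c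
          (fun j hj => h j (by simp [hj]))]
        cases hidx : PySem.List.index?
            (pvBals lines (PySem.List.pyRange (c + 1) lines.length 1) (bk + pvDelta lines c))
            (bk + pvDelta lines c - 1) with
        | none => rfl
        | some j =>
          simp only [Option.map_some]
          have hjlt : j < (PySem.List.pyRange (c + 1) (lines.length : Int) 1).length := by
            obtain ⟨hk, -, -⟩ := PySem.List.getElem_of_index?_eq_some hidx
            rwa [pvBals_length] at hk
          have hval : PySem.List.pyGetD (PySem.List.pyRange (c + 1) lines.length 1) (j : Int) 0
              = c + 1 + j := by
            rw [PySem.List.pyGetD_natCast, List.getD_eq_getElem _ _ hjlt,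
              PySem.List.getElem_pyRange_one]
          rw [hval]
          have hsum : e + ((k + 1 + j : Nat) : Int) = c + 1 + (j : Int) := by
            push_cast
            omega
          rw [hsum]
      · rw [if_neg hs, if_neg hs]
        have hcast : ((k : Int)) + 1 = (((k + 1 : Nat)) : Int) := by push_cast; ring
        rw [hcast]
        exact ih (c + 1) (k + 1) (bk + pvDelta lines c) (by push_cast; omega) (by omega)
          (fun j hj => h j (by simp [hj])) hdrop1
    · have hnil : PySem.List.pyRange c (lines.length : Int) 1 = [] :=
        PySem.List.pyRange_one_eq_nil (by omega)
      rw [hnil]; rfl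

-- ===== VERDICT =====
theorem find_function_bounds_py_spec : Claim_equal_find_function_bounds_py := by
  intro lines e _ hpre
  unfold Spec_find_function_bounds_py find_function_bounds_py find_function_bounds_py_alt
  obtain ⟨hge, -⟩ := hpre
  have hvalid : ∀ i ∈ PySem.List.pyRange e lines.length 1,
      PySem.List.pyGet? lines i = some (PySem.List.pyGetD lines i "") := by
    intro i hi
    rw [PySem.List.mem_pyRange_one] at hi
    exact pvGet_eq lines i (by omega) (by omega)
  rw [pvBal_eq lines _ 0 hvalid]
  have h0 : ((0 : Nat) : Int) = (0 : Int) := rfl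
  have := pvScan_eq lines e (pvBals lines (PySem.List.pyRange e lines.length 1) 0)
    ((lines.length : Int) - e).toNat e 0 0 (by simp) le_rfl hvalid (by rw [List.drop_zero])
  rw [h0] at this
  exact this
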